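-- pv_equiv track=rewrite | github.com/cirosantilli/project-euler-solutions | solvers/884.py | build_base_prefix
-- ===== SOURCE A (Python) =====
-- def icbrt(n: int) -> int:
--     """Return floor(cuberoot(n)) for n >= 0."""
--     if n <= 0:
--         return 0
--     # Double precision is accurate enough for our ranges; adjust to be exact.
--     x = int(round(n ** (1.0 / 3.0)))
--     # Adjust around the floating estimate.
--     while (x + 1) * (x + 1) * (x + 1) <= n:
--         x += 1
--     while x * x * x > n:
--         x -= 1
--     return x
--
-- def d_greedy(n: int) -> int:
--     """Directly compute D(n) by simulating the subtraction process (for tests)."""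
--     steps = 0
--     while n > 0:
--         k = icbrt(n)
--         n -= k * k * k
--         steps += 1
--     return steps
--
-- def build_base_prefix(limit: int) -> list[int]:
--     """Build F(n) = sum_{m=0}^{n-1} D(m) for n in [0..limit]."""
--     d = [0] * limit
--     for i in range(limit):
--         d[i] = d_greedy(i)
--     pref = [0] * (limit + 1)
--     s = 0
--     for i in range(limit):
--         s += d[i]
--         pref[i + 1] = s
--     return pref
-- ===== SOURCE B (Python) =====
-- def build_base_prefix(limit: int) -> list[int]:
--     """Build F(n) = sum_{m=0}^{n-1} D(m) for n in [0..limit] by dynamic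
--     programming: D(i) = 1 + D(i - icbrt(i)**3), with the integer cube root
--     maintained incrementally instead of recomputed."""
--     if limit <= 0:
--         return [0] * (limit + 1)
--     d = [0]  # d[i] = D(i)
--     k = 0    # k = floor(cbrt(i)) for the current i, maintained incrementally
--     for i in range(1, limit):
--         if (k + 1) ** 3 <= i:
--             k += 1
--         d.append(d[i - k ** 3] + 1)
--     pref = [0]
--     s = 0
--     for x in d:
--         s += x
--         pref.append(s)
--     return pref
-- ===== Notes on version B (the rewrite author's own statement) =====
-- stated objective: faster
-- what changed: Replaces the per-element greedy simulation of D(i) (each step recomputing an integer cube root) by a single-pass dynamic program d[i] = d[i - k**3] + 1 with the cube root k maintained incrementally, then one prefix-sum pass.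
import Mathlib
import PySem

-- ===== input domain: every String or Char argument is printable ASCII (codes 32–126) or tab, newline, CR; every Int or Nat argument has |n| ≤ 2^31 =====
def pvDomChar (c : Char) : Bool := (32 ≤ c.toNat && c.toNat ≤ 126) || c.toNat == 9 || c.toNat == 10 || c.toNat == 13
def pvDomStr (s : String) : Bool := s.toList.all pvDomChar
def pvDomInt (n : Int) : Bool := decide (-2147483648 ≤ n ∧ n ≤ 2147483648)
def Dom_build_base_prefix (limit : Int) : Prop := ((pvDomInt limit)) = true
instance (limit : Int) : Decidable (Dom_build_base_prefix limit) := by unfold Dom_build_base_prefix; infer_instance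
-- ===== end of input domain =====

-- B replaces the per-element greedy simulation (with its cube-root search) by a
-- single-pass DP d[i] = d[i - k^3] + 1 with the cube root k maintained incrementally;
-- a timing run measured B faster. Equivalence proved for all Int limits.

-- ===== PORT A =====
-- icbrt: the float estimate `int(round(n ** (1/3)))` is replaced by the exact start 0;
-- the two Python adjustment while-loops make the final value exact for ANY start, so
-- this port is exact. The loops are ported with sufficient fuel (n.toNat resp. x.toNat).
def pvIcbrtUp (n : Int) : Nat → Int → Int
  | 0, x => x
  | f + 1, x => if (x + 1) * (x + 1) * (x + 1) ≤ n then pvIcbrtUp n f (x + 1) else x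

def pvIcbrtDown (n : Int) : Nat → Int → Int
  | 0, x => x
  | f + 1, x => if x * x * x > n then pvIcbrtDown n f (x - 1) else x

def pvIcbrt (n : Int) : Int :=
  if n ≤ 0 then 0
  else
    let x := pvIcbrtUp n n.toNat 0
    pvIcbrtDown n x.toNat x

-- d_greedy: `while n > 0: k = icbrt(n); n -= k*k*k; steps += 1`, fuel n.toNat suffices
-- because n decreases by at least 1 each iteration.
def pvDGreedy : Nat → Int → Int → Int
  | 0, _, steps => steps
  | f + 1, n, steps =>
      if n > 0 then
        let k := pvIcbrt n
        pvDGreedy f (n - k * k * k) (steps + 1)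
      else steps

def build_base_prefix (limit : Int) : List Int :=
  -- d = [0]*limit; for i in range(limit): d[i] = d_greedy(i)
  let d := (PySem.List.pyRange 0 limit 1).map (fun i => pvDGreedy i.toNat i 0)
  -- pref = [0]*(limit+1); the loop writes pref[i+1] = s for i = 0..limit-1, i.e. it
  -- replaces every slot after the first; rendered as `take 1 ++ written suffix`.
  let pref0 := List.replicate (limit + 1).toNat (0 : Int)
  let upd := (d.foldl (fun (p : Int × List Int) di => (p.1 + di, p.2 ++ [p.1 + di]))
      ((0 : Int), ([] : List Int))).2
  pref0.take 1 ++ upd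

-- ===== PORT B =====
def build_base_prefix_alt (limit : Int) : List Int :=
  if limit ≤ 0 then List.replicate (limit + 1).toNat 0
  else
    let d := ((PySem.List.pyRange 1 limit 1).foldl
      (fun (st : Int × List Int) i =>
        let k := if (st.1 + 1) * (st.1 + 1) * (st.1 + 1) ≤ i then st.1 + 1 else st.1
        (k, st.2 ++ [PySem.List.pyGetD st.2 (i - k * k * k) 0 + 1]))
      ((0 : Int), ([0] : List Int))).2
    (d.foldl (fun (p : Int × List Int) x => (p.1 + x, p.2 ++ [p.1 + x]))
      ((0 : Int), ([0] : List Int))).2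

-- ===== PRECONDITION & SPEC =====
def Spec_build_base_prefix (limit : Int) (out : List Int) : Prop := out = build_base_prefix_alt limit
instance (limit : Int) (out : List Int) : Decidable (Spec_build_base_prefix limit out) := by unfold Spec_build_base_prefix; infer_instance

-- ===== CLAIM (what is proved, stated in full; the proofs are below) =====
def Claim_equal_build_base_prefix : Prop := ∀ (limit : Int), Dom_build_base_prefix limit → Spec_build_base_prefix limit (build_base_prefix limit)

-- ===== LEMMAS AND PROOFS =====

-- `isFC n k` : k is the floor cube root of n.
def isFC (n k : Int) : Prop := 0 ≤ k ∧ k * k * k ≤ n ∧ n < (k + 1) * (k + 1) * (k + 1)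

theorem isFC_unique {n a b : Int} (ha : isFC n a) (hb : isFC n b) : a = b := by
  obtain ⟨ha0, ha1, ha2⟩ := ha
  obtain ⟨hb0, hb1, hb2⟩ := hb
  by_contra h
  rcases lt_or_gt_of_ne h with hlt | hlt
  · nlinarith [mul_le_mul (mul_le_mul (by omega : a + 1 ≤ b) (by omega : a + 1 ≤ b) (by omega) hb0) (by omega : a + 1 ≤ b) (by omega) (by positivity)]
  · nlinarith [mul_le_mul (mul_le_mul (by omega : b + 1 ≤ a) (by omega : b + 1 ≤ a) (by omega) ha0) (by omega : b + 1 ≤ a) (by omega) (by positivity)]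

theorem isFC_pos {n k : Int} (h : isFC n k) (hn : 1 ≤ n) : 1 ≤ k := by
  obtain ⟨h0, _, h2⟩ := h
  by_contra hk
  have : k = 0 := by omega
  subst this; omega

theorem pvIcbrtUp_spec (n : Int) : ∀ (f : Nat) (x : Int), 0 ≤ x → x * x * x ≤ n →
    n < (x + (f : Int) + 1) * (x + (f : Int) + 1) * (x + (f : Int) + 1) →
    isFC n (pvIcbrtUp n f x) := by
  intro f
  induction f with
  | zero =>
      intro x hx h1 h2
      simp only [pvIcbrtUp]
      exact ⟨hx, h1, by norm_num at h2; linarith⟩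
  | succ f ih =>
      intro x hx h1 h2
      simp only [pvIcbrtUp]
      split_ifs with h
      · exact ih (x + 1) (by omega) h (by push_cast at h2 ⊢; linarith)
      · exact ⟨hx, h1, by linarith [not_le.mp h]⟩

theorem pvIcbrtDown_id (n : Int) (f : Nat) (x : Int) (h : x * x * x ≤ n) :
    pvIcbrtDown n f x = x := by
  cases f with
  | zero => rfl
  | succ f => simp [pvIcbrtDown, not_lt.mpr h]

theorem pvIcbrt_spec (n : Int) (hn : 1 ≤ n) : isFC n (pvIcbrt n) := by
  have hnle : ¬ n ≤ 0 := by omega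
  have hup : isFC n (pvIcbrtUp n n.toNat 0) := by
    apply pvIcbrtUp_spec n n.toNat 0 le_rfl (by omega)
    have : ((n.toNat : Int)) = n := Int.toNat_of_nonneg (by omega)
    rw [this]
    nlinarith
  simp only [pvIcbrt, hnle, if_false]
  rw [pvIcbrtDown_id n _ _ hup.2.1]
  exact hup

theorem pvIcbrt_pos (n : Int) (hn : 1 ≤ n) : 1 ≤ pvIcbrt n :=
  isFC_pos (pvIcbrt_spec n hn) hn

theorem cube_pos {k : Int} (h : 1 ≤ k) : 1 ≤ k * k * k := by nlinarith

-- accumulator linearity of the greedy loop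
theorem pvDGreedy_acc : ∀ (f : Nat) (n s : Int), pvDGreedy f n s = s + pvDGreedy f n 0 := by
  intro f
  induction f with
  | zero => intro n s; simp [pvDGreedy]
  | succ f ih =>
      intro n s
      simp only [pvDGreedy]
      split_ifs with h
      · rw [ih _ (s + 1), ih _ (0 + 1)]; ring
      · simp

theorem pvDGreedy_nonpos (f : Nat) (n s : Int) (h : ¬ n > 0) : pvDGreedy f n s = s := by
  cases f with
  | zero => rfl
  | succ f => simp [pvDGreedy, h]

-- fuel irrelevance: any fuel ≥ n gives the same value
theorem pvDGreedy_fuel : ∀ (f : Nat) (f' : Nat) (n : Int), 0 ≤ n → n ≤ (f : Int) → n ≤ (f' : Int) →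
    pvDGreedy f n 0 = pvDGreedy f' n 0 := by
  intro f
  induction f with
  | zero =>
      intro f' n h0 h1 _
      have : n = 0 := by omega
      subst this
      rw [pvDGreedy_nonpos _ _ _ (by omega), pvDGreedy_nonpos _ _ _ (by omega)]
  | succ f ih =>
      intro f' n h0 h1 h2
      by_cases hpos : n > 0
      · obtain ⟨f'', rfl⟩ : ∃ f'', f' = f'' + 1 := by
          cases f' with
          | zero => exfalso; omega
          | succ f'' => exact ⟨f'', rfl⟩
        have hk := pvIcbrt_spec n hpos
        have hk1 := cube_pos (pvIcbrt_pos n hpos)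
        have hk2 : pvIcbrt n * pvIcbrt n * pvIcbrt n ≤ n := hk.2.1
        simp only [pvDGreedy, if_pos hpos]
        rw [pvDGreedy_acc f, pvDGreedy_acc f'']
        congr 1
        exact ih f'' _ (by omega) (by push_cast at h1 ⊢; omega) (by push_cast at h2 ⊢; omega)
      · rw [pvDGreedy_nonpos _ _ _ hpos, pvDGreedy_nonpos _ _ _ hpos]

-- canonical D
def pvD (n : Int) : Int := pvDGreedy n.toNat n 0

theorem pvD_rec (n : Int) (hn : 1 ≤ n) : pvD n = pvD (n - pvIcbrt n * pvIcbrt n * pvIcbrt n) + 1 := by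
  have hk := pvIcbrt_spec n hn
  have hk1 := cube_pos (pvIcbrt_pos n hn)
  have hk2 : pvIcbrt n * pvIcbrt n * pvIcbrt n ≤ n := hk.2.1
  obtain ⟨f, hf⟩ : ∃ f, n.toNat = f + 1 := ⟨n.toNat - 1, by omega⟩
  unfold pvD
  rw [hf]
  simp only [pvDGreedy, if_pos (by omega : n > 0)]
  rw [pvDGreedy_acc]
  rw [pvDGreedy_fuel f (n - pvIcbrt n * pvIcbrt n * pvIcbrt n).toNat _ (by omega)
      (by omega) (by omega)]
  ring

theorem pvD_zero : pvD 0 = 0 := rfl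

-- the B-side fold invariant
theorem alt_fold_inv (m : Int) (hm : 1 ≤ m) :
    ∃ k, isFC (m - 1) k ∧
      (PySem.List.pyRange 1 m 1).foldl
        (fun (st : Int × List Int) i =>
          let k := if (st.1 + 1) * (st.1 + 1) * (st.1 + 1) ≤ i then st.1 + 1 else st.1
          (k, st.2 ++ [PySem.List.pyGetD st.2 (i - k * k * k) 0 + 1]))
        ((0 : Int), ([0] : List Int))
      = (k, (PySem.List.pyRange 0 m 1).map pvD) := by
  induction m, hm using Int.le_induction with
  | base =>
      refine ⟨0, by unfold isFC; omega, ?_⟩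
      rw [PySem.List.pyRange_one_eq_nil le_rfl]
      have h01 : PySem.List.pyRange 0 1 1 = [0] := by decide
      simp [h01, pvD_zero]
  | succ m hm ih =>
      obtain ⟨k, hk, hfold⟩ := ih
      rw [PySem.List.pyRange_one_succ_right hm, List.foldl_append, hfold]
      set k' : Int := if (k + 1) * (k + 1) * (k + 1) ≤ m then k + 1 else k with hk'
      have hfc : isFC m k' := by
        obtain ⟨h0, h1, h2⟩ := hk
        rw [hk']
        split_ifs with h
        · exact ⟨by omega, h, by nlinarith⟩
        · exact ⟨h0, by omega, by omega⟩
      have hk'1 : 1 ≤ k' := isFC_pos hfc hm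
      have hcube : 1 ≤ k' * k' * k' := cube_pos hk'1
      have hidx0 : 0 ≤ m - k' * k' * k' := by have := hfc.2.1; omega
      have hidxlt : m - k' * k' * k' < m := by omega
      have hget : PySem.List.pyGetD ((PySem.List.pyRange 0 m 1).map pvD) (m - k' * k' * k') 0
          = pvD (m - k' * k' * k') :=
        PySem.List.pyGetD_map_pyRange_of_nonneg pvD m _ 0 hidx0 hidxlt
      have hD : pvD m = pvD (m - k' * k' * k') + 1 := by
        have := pvD_rec m hm
        rwa [isFC_unique (pvIcbrt_spec m hm) hfc] at this
      refine ⟨k', by simpa using hfc, ?_⟩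
      simp only [List.foldl_cons, List.foldl_nil]
      rw [← hk', hget, ← hD, PySem.List.pyRange_one_succ_right (by omega : (0:Int) ≤ m),
        List.map_append]
      simp

-- the prefix-sum fold only appends: factor out the initial accumulator
theorem pref_fold_acc : ∀ (d : List Int) (s : Int) (acc : List Int),
    (d.foldl (fun (p : Int × List Int) x => (p.1 + x, p.2 ++ [p.1 + x])) (s, acc)).2
      = acc ++ (d.foldl (fun (p : Int × List Int) x => (p.1 + x, p.2 ++ [p.1 + x])) (s, [])).2 := by
  intro d
  induction d with
  | nil => simp
  | cons x t ih =>
      intro s acc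
      simp only [List.foldl_cons]
      rw [ih _ (acc ++ [s + x]), ih _ ([] ++ [s + x])]
      simp

-- ===== VERDICT (by name: the statement is the Claim_ definition above) =====
theorem build_base_prefix_spec : Claim_equal_build_base_prefix := by
  intro limit _
  unfold Spec_build_base_prefix build_base_prefix build_base_prefix_alt
  by_cases hle : limit ≤ 0
  · rw [if_pos hle]
    rw [PySem.List.pyRange_one_eq_nil hle]
    simp only [List.map_nil, List.foldl_nil, List.append_nil]
    rw [List.take_replicate]
    congr 1
    omega
  · rw [if_neg hle]
    have h1 : (1 : Int) ≤ limit := by omega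
    obtain ⟨k, _, hfold⟩ := alt_fold_inv limit h1
    rw [hfold]
    simp only []
    rw [pref_fold_acc _ 0 [0]]
    have htake : (List.replicate (limit + 1).toNat (0 : Int)).take 1 = [0] := by
      have : ∃ t, (limit + 1).toNat = t + 1 := ⟨(limit + 1).toNat - 1, by omega⟩
      obtain ⟨t, ht⟩ := this
      rw [ht]
      simp [List.replicate_succ]
    rw [htake]
    rfl
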